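-- pv_equiv track=rewrite | github.com/zyshin/nativis | proxyhandler/features.py | _left_branching_tree
-- ===== SOURCE A (Python) =====
-- def _left_branching_tree(target, tree):
-- 	r = depth = nodes = 0
-- 	tgdepth = len(tree)
-- 	for i, c in enumerate(tree):
-- 		if c == '(':
-- 			depth += 1
-- 			nodes += 1
-- 			if tree[i+1:i+3] == target:
-- 				if depth < tgdepth:
-- 					tgdepth = depth
-- 					r = nodes
-- 		elif c == ')':
-- 			depth -= 1
-- 	return r
-- ===== SOURCE B (Python) =====
-- def _left_branching_tree(target, tree):
-- 	pre = [(0, 0)]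
-- 	for c in tree:
-- 		o, cl = pre[-1]
-- 		pre.append((o + (c == '('), cl + (c == ')')))
-- 	cands = [(pre[i+1][0] - pre[i+1][1], pre[i+1][0])
-- 	         for i in range(len(tree))
-- 	         if tree[i] == '(' and tree[i+1:i+3] == target]
-- 	return min(cands)[1] if cands else 0
-- ===== Notes on version B (the rewrite author's own statement) =====
-- stated objective: alternative
-- what changed: Replaces A's single pass with a running best (r/depth/nodes/tgdepth) by a two-phase computation: build a prefix-count table of '('/')', collect every qualifying position as a (depth, nodes) tuple read off the table, and return min(candidates)[1] (tuple min reproduces A's strictly-shallower first-wins rule).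
-- outside the precondition, e.g. on _left_branching_tree('', '('): A returns 0, B returns 1; on _left_branching_tree('', '(('): A returns 0, B returns 2
import Mathlib
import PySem

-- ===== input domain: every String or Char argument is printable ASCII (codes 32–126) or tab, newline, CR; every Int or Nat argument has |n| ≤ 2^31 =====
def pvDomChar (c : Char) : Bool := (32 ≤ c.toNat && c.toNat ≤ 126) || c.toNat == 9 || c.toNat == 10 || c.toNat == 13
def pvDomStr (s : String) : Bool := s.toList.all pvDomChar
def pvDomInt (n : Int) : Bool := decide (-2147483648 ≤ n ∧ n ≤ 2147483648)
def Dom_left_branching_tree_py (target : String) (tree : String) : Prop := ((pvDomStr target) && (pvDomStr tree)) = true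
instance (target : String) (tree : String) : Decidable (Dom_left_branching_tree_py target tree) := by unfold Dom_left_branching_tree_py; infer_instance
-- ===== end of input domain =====

-- B replaces A's single pass with a running best (r/depth/nodes/tgdepth) by a two-phase
-- computation: a prefix-count table of '(' / ')', a candidate list of (depth, nodes)
-- tuples read off that table, and a final tuple-minimum (objective: alternative).

-- ===== PORT A =====
-- the loop body of A, named (state = (r, depth, nodes, tgdepth), element = (i, c))
def pvStepA (cs tgt : List Char) (s : Int × Int × Int × Int) (ic : Int × Char) : Int × Int × Int × Int :=
  if ic.2 = '(' then
    let depth := s.2.1 + 1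
    let nodes := s.2.2.1 + 1
    if PySem.List.slice cs (some (ic.1 + 1)) (some (ic.1 + 3)) = tgt then
      if depth < s.2.2.2 then (nodes, depth, nodes, depth) else (s.1, depth, nodes, s.2.2.2)
    else (s.1, depth, nodes, s.2.2.2)
  else if ic.2 = ')' then (s.1, s.2.1 - 1, s.2.2.1, s.2.2.2)
  else s

def left_branching_tree_py (target : String) (tree : String) : Int :=
  ((PySem.List.enumerate tree.toList 0).foldl (pvStepA tree.toList target.toList)
    (0, 0, 0, (tree.toList.length : Int))).1


-- ===== PORT B =====
-- Python's min() on (int, int) tuples: first minimum wins, lexicographic order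
-- (Lean's < on products is pointwise, so the comparison is spelled out)
def pvLexMin (b x : Int × Int) : Int × Int :=
  if x.1 < b.1 ∨ (x.1 = b.1 ∧ x.2 < b.2) then x else b


-- min(cands) is ported as a first-wins fold of pvLexMin over the candidate list;
-- pre[-1] reads the always-nonempty table, so pyGet? is always some and the default
-- (0, 0) of getD is never read
def left_branching_tree_py_alt (target : String) (tree : String) : Int :=
  let cs := tree.toList
  let pre := cs.foldl (fun (acc : List (Int × Int)) c =>
      acc ++ [(((PySem.List.pyGet? acc (-1)).getD (0, 0)).1 + (if c = '(' then 1 else 0),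
               ((PySem.List.pyGet? acc (-1)).getD (0, 0)).2 + (if c = ')' then 1 else 0))]) [(0, 0)]
  let cands := ((PySem.List.pyRange 0 (cs.length : Int) 1).filter
      (fun i => decide (PySem.List.pyGet? cs i = some '(' ∧
                        PySem.List.slice cs (some (i + 1)) (some (i + 3)) = target.toList))).map
      (fun i => (((PySem.List.pyGet? pre (i + 1)).getD (0, 0)).1
                   - ((PySem.List.pyGet? pre (i + 1)).getD (0, 0)).2,
                 ((PySem.List.pyGet? pre (i + 1)).getD (0, 0)).1))
  match cands with
  | [] => 0
  | c :: rest => (rest.foldl pvLexMin c).2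


-- ===== PRECONDITION & SPEC =====
-- Pre_ excludes only the degenerate corner: target = "" with a nonempty tree consisting
-- entirely of '(' — there the lone empty-slice match sits at depth = len(tree), which A's
-- sentinel tgdepth = len(tree) rejects (A returns 0, "no match") while B reports that
-- node; both readings of this nonsense input are defensible.
def Pre_left_branching_tree_py (target : String) (tree : String) : Prop :=
  ¬ (target.toList = [] ∧ tree.toList ≠ [] ∧ ∀ c ∈ tree.toList, c = '(')
instance (target : String) (tree : String) : Decidable (Pre_left_branching_tree_py target tree) := by
  unfold Pre_left_branching_tree_py; infer_instance

def pvWitness_left_branching_tree_py : String × String := ("NP", "((NP x) (VP y))")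

def Spec_left_branching_tree_py (target : String) (tree : String) (out : Int) : Prop :=
  out = left_branching_tree_py_alt target tree
instance (target : String) (tree : String) (out : Int) : Decidable (Spec_left_branching_tree_py target tree out) := by
  unfold Spec_left_branching_tree_py; infer_instance

-- ===== CLAIM (what is proved, stated in full; the proofs are below) =====
def Claim_equal_left_branching_tree_py : Prop :=
  ∀ (target : String) (tree : String), Dom_left_branching_tree_py target tree →
    Pre_left_branching_tree_py target tree →
    Spec_left_branching_tree_py target tree (left_branching_tree_py target tree)

-- ===== LEMMAS AND PROOFS =====

-- candidate list of (depth, nodes) pairs produced while replaying A's depth/nodes updates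
def pvCands (cs tgt : List Char) : List (Int × Char) → Int → Int → List (Int × Int)
  | [], _, _ => []
  | (i, c) :: rest, d, k =>
    if c = '(' then
      (if PySem.List.slice cs (some (i + 1)) (some (i + 3)) = tgt then [(d + 1, k + 1)] else []) ++
        pvCands cs tgt rest (d + 1) (k + 1)
    else if c = ')' then pvCands cs tgt rest (d - 1) k
    else pvCands cs tgt rest d k

-- A's best-so-far update, restricted to the (r, tgdepth) components of its state
def pvRunA : List (Int × Int) → Int × Int → Int × Int
  | [], p => p
  | x :: rest, p => pvRunA rest (if x.1 < p.2 then (x.2, x.1) else p)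


-- the filter predicate and map function of B's candidate comprehension, named
def pvQ (cs tgt : List Char) (i : Int) : Bool :=
  decide (PySem.List.pyGet? cs i = some '(' ∧
          PySem.List.slice cs (some (i + 1)) (some (i + 3)) = tgt)


def pvF (cs : List Char) (i : Int) : Int × Int :=
  (((cs.take (i.toNat + 1)).count '(' : Int) - ((cs.take (i.toNat + 1)).count ')' : Int),
   ((cs.take (i.toNat + 1)).count '(' : Int))


lemma pvA_fold (cs tgt : List Char) : ∀ (L : List (Int × Char)) (r d k tg : Int),
      (L.foldl (pvStepA cs tgt) (r, d, k, tg)).1 = (pvRunA (pvCands cs tgt L d k) (r, tg)).1 := by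
  intro L
  induction L with
  | nil => intro r d k tg; simp [pvCands, pvRunA]
  | cons hd tl ih =>
    obtain ⟨i, c⟩ := hd
    intro r d k tg
    by_cases h1 : c = '('
    · by_cases h2 : PySem.List.slice cs (some (i + 1)) (some (i + 3)) = tgt
      · by_cases h3 : d + 1 < tg
        · simp [pvStepA, pvCands, pvRunA, h1, h2, h3, ih]
        · simp [pvStepA, pvCands, pvRunA, h1, h2, h3, ih]
      · simp [pvStepA, pvCands, pvRunA, h1, h2, ih]
    · by_cases h4 : c = ')'
      · simp [pvStepA, pvCands, pvRunA, h1, h4, ih]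
      · simp [pvStepA, pvCands, pvRunA, h1, h4, ih]

lemma pvCands_nodes_lt (cs tgt : List Char) :
    ∀ (L : List (Int × Char)) (d k : Int) (x : Int × Int), x ∈ pvCands cs tgt L d k → k < x.2 := by
  intro L
  induction L with
  | nil => intro d k x hx; simp [pvCands] at hx
  | cons hd tl ih =>
    obtain ⟨i, c⟩ := hd
    intro d k x hx
    by_cases h1 : c = '('
    · by_cases h2 : PySem.List.slice cs (some (i + 1)) (some (i + 3)) = tgt
      · simp [pvCands, h1, h2] at hx
        rcases hx with h | h
        · simp [h]
        · have := ih (d+1) (k+1) x h; omega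
      · simp [pvCands, h1, h2] at hx
        have := ih (d+1) (k+1) x hx; omega
    · by_cases h4 : c = ')'
      · simp only [pvCands, if_neg h1, if_pos h4] at hx; exact ih _ _ _ hx
      · simp only [pvCands, if_neg h1, if_neg h4] at hx; exact ih _ _ _ hx


lemma pvCands_pairwise (cs tgt : List Char) :
    ∀ (L : List (Int × Char)) (d k : Int),
      (pvCands cs tgt L d k).Pairwise (fun a b => a.2 < b.2) := by
  intro L
  induction L with
  | nil => intro d k; simp [pvCands]
  | cons hd tl ih =>
    obtain ⟨i, c⟩ := hd
    intro d k
    by_cases h1 : c = '('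
    · by_cases h2 : PySem.List.slice cs (some (i + 1)) (some (i + 3)) = tgt
      · simp only [pvCands, if_pos h1, if_pos h2, List.singleton_append, List.pairwise_cons]
        exact ⟨fun y hy => by simpa using pvCands_nodes_lt cs tgt tl (d+1) (k+1) y hy, ih _ _⟩
      · simp only [pvCands, if_pos h1, if_neg h2, List.nil_append]; exact ih _ _
    · by_cases h4 : c = ')'
      · simp only [pvCands, if_neg h1, if_pos h4]; exact ih _ _
      · simp only [pvCands, if_neg h1, if_neg h4]; exact ih _ _


lemma pvRunA_eq_lexmin :
    ∀ (cands : List (Int × Int)) (b : Int × Int),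
      (∀ x ∈ cands, b.2 < x.2) → cands.Pairwise (fun a b => a.2 < b.2) →
      (pvRunA cands (b.2, b.1)).1 = (cands.foldl pvLexMin b).2 := by
  intro cands
  induction cands with
  | nil => intro b _ _; rfl
  | cons x rest ih =>
    intro b hb hp
    have hbx : b.2 < x.2 := hb x (by simp)
    rw [List.pairwise_cons] at hp
    have hstep : pvLexMin b x = if x.1 < b.1 then x else b := by
      by_cases hx : x.1 < b.1
      · simp [pvLexMin, hx]
      · have hcond : ¬ (x.1 < b.1 ∨ (x.1 = b.1 ∧ x.2 < b.2)) := by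
          rintro (h | ⟨h1, h2⟩) <;> omega
        unfold pvLexMin; rw [if_neg hcond, if_neg hx]
    simp only [List.foldl_cons]
    by_cases hx : x.1 < b.1
    · rw [hstep, if_pos hx]
      simp only [pvRunA, if_pos hx]
      exact ih x (fun y hy => hp.1 y hy) hp.2
    · rw [hstep, if_neg hx]
      simp only [pvRunA, if_neg hx]
      exact ih b (fun y hy => hb y (List.mem_cons_of_mem _ hy)) hp.2

lemma pvTable (cs : List Char) :
    cs.foldl (fun (acc : List (Int × Int)) c =>
        acc ++ [(((PySem.List.pyGet? acc (-1)).getD (0, 0)).1 + (if c = '(' then 1 else 0),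
                 ((PySem.List.pyGet? acc (-1)).getD (0, 0)).2 + (if c = ')' then 1 else 0))]) [(0, 0)]
      = (List.range (cs.length + 1)).map
          (fun j => (((cs.take j).count '(' : Int), ((cs.take j).count ')' : Int))) := by
  induction cs using List.reverseRecOn with
  | nil => simp
  | append_singleton l c ih =>
    rw [List.foldl_append, ih]
    have hlast : PySem.List.pyGet? ((List.range (l.length + 1)).map
        (fun j => (((l.take j).count '(' : Int), ((l.take j).count ')' : Int)))) (-1)
        = some ((l.count '(' : Int), (l.count ')' : Int)) := by
      rw [PySem.List.pyGet?_neg_one, List.range_succ, List.map_append]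
      simp
    simp only [List.foldl_cons, List.foldl_nil, hlast, Option.getD_some]
    have hlen : (l ++ [c]).length + 1 = (l.length + 1) + 1 := by simp
    rw [hlen]
    conv_rhs => rw [List.range_succ, List.map_append]
    congr 1
    · apply List.map_congr_left
      intro j hj
      rw [List.mem_range] at hj
      rw [List.take_append_of_le_length (by omega)]
    · simp only [List.map_cons, List.map_nil]
      have : (l ++ [c]).take (l.length + 1) = l ++ [c] := by
        rw [List.take_of_length_le (by simp)]
      rw [this]
      simp [List.count_append, List.count_singleton]

lemma pvCands_eq (cs tgt : List Char) :
    ∀ (suf pre : List Char), pre ++ suf = cs →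
      pvCands cs tgt (PySem.List.enumerate suf (pre.length : Int))
          ((pre.count '(' : Int) - (pre.count ')' : Int)) (pre.count '(' : Int)
        = ((PySem.List.pyRange (pre.length : Int) (cs.length : Int) 1).filter (pvQ cs tgt)).map (pvF cs) := by
  intro suf
  induction suf with
  | nil =>
    intro pre hpre
    have : (cs.length : Int) ≤ (pre.length : Int) := by
      rw [← hpre]; simp
    rw [PySem.List.enumerate_nil, PySem.List.pyRange_one_eq_nil this]
    simp [pvCands]
  | cons c rest ih =>
    intro pre hpre
    have hlt : (pre.length : Int) < (cs.length : Int) := by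
      rw [← hpre]; simp
    have hget : PySem.List.pyGet? cs (pre.length : Int) = some c := by
      rw [← hpre]; exact PySem.List.pyGet?_append_length pre rest c
    have hih := ih (pre ++ [c]) (by simpa using hpre)
    have hlen' : ((pre ++ [c]).length : Int) = (pre.length : Int) + 1 := by simp
    rw [hlen'] at hih
    have htake : cs.take (pre.length + 1) = pre ++ [c] := by
      rw [← hpre, ← List.singleton_append, ← List.append_assoc]
      rw [List.take_append_of_le_length (by simp)]
      simp
    rw [PySem.List.enumerate_cons, PySem.List.pyRange_one_cons hlt]
    by_cases h1 : c = '('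
    · by_cases h2 : PySem.List.slice cs (some ((pre.length : Int) + 1)) (some ((pre.length : Int) + 3)) = tgt
      · have hq : pvQ cs tgt (pre.length : Int) = true := by
          simp [pvQ, hget, h1, h2]
        simp only [pvCands, if_pos h1, if_pos h2, List.singleton_append,
          List.filter_cons, hq, if_pos, List.map_cons]
        congr 1
        · -- head: pvF cs ↑pre.length = (d+1, k+1)
          simp only [pvF, Int.toNat_natCast, htake]
          simp [List.count_append, List.count_singleton, h1]
          omega
        · rw [← hih]
          congr 1 <;> simp [List.count_append, h1] <;> omega
      · have hq : pvQ cs tgt (pre.length : Int) = false := by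
          simp [pvQ, h2]
        simp only [pvCands, if_pos h1, if_neg h2, List.nil_append,
          List.filter_cons, hq, Bool.false_eq_true, if_false]
        rw [← hih]
        congr 1 <;> simp [List.count_append, h1] <;> omega
    · have hq : pvQ cs tgt (pre.length : Int) = false := by
        simp [pvQ, hget, h1]
      by_cases h4 : c = ')'
      · simp only [pvCands, if_neg h1, if_pos h4, List.filter_cons, hq, Bool.false_eq_true, if_false]
        rw [← hih]
        congr 1 <;> simp [List.count_append, h1, h4] <;> omega
      · simp only [pvCands, if_neg h1, if_neg h4, List.filter_cons, hq, Bool.false_eq_true, if_false]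
        rw [← hih]
        congr 1 <;> simp [List.count_append, h1, h4]

lemma pvDepth_lt (cs tgt : List Char)
    (hpre : ¬ (tgt = [] ∧ cs ≠ [] ∧ ∀ c ∈ cs, c = '(')) :
    ∀ x ∈ ((PySem.List.pyRange 0 (cs.length : Int) 1).filter (pvQ cs tgt)).map (pvF cs),
      x.1 < (cs.length : Int) := by
  intro x hx
  rw [List.mem_map] at hx
  obtain ⟨i, hi, rfl⟩ := hx
  rw [List.mem_filter] at hi
  obtain ⟨hir, hq⟩ := hi
  rw [PySem.List.mem_pyRange_one] at hir
  simp only [pvQ, decide_eq_true_eq] at hq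
  obtain ⟨hgr, hslice⟩ := hq
  have hlen : (cs.take (i.toNat + 1)).length = i.toNat + 1 := by
    rw [List.length_take]; omega
  have hc1 : (cs.take (i.toNat + 1)).count '(' ≤ i.toNat + 1 :=
    le_trans (List.count_le_length) (le_of_eq hlen)
  simp only [pvF]
  by_contra h
  have hc2 : (cs.take (i.toNat + 1)).count ')' = 0 ∧
      (cs.take (i.toNat + 1)).count '(' = i.toNat + 1 ∧ i.toNat + 1 = cs.length := by
    omega
  have htake : cs.take (i.toNat + 1) = cs := by
    rw [hc2.2.2, List.take_length]
  have hall : ∀ c ∈ cs, c = '(' := by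
    have hcl : cs.count '(' = cs.length := by
      have := hc2.2.1
      rw [htake] at this
      omega
    intro c hc
    exact (List.count_eq_length.mp hcl c hc).symm
  have hne : cs ≠ [] := by
    intro h0
    have h00 := hc2.2.2
    rw [h0] at h00
    simp at h00
  have htgt : tgt = [] := by
    have hs := PySem.List.slice_toNat (xs := cs) (a := i + 1) (b := i + 3) (by omega) (by omega)
    rw [← hslice, hs]
    have hd : (i + 1).toNat = cs.length := by omega
    rw [hd, List.drop_length, List.take_nil]
  exact hpre ⟨htgt, hne, hall⟩

lemma pvMain (target tree : String)
    (hpre : ¬ (target.toList = [] ∧ tree.toList ≠ [] ∧ ∀ c ∈ tree.toList, c = '(')) :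
    left_branching_tree_py target tree = left_branching_tree_py_alt target tree := by
  simp only [left_branching_tree_py, left_branching_tree_py_alt]
  rw [pvA_fold, pvTable tree.toList]
  have hM0 := pvCands_eq tree.toList target.toList tree.toList [] (by simp)
  simp only [List.length_nil, List.count_nil, Nat.cast_zero, sub_zero] at hM0
  rw [hM0]
  rw [show (fun i : Int => decide (PySem.List.pyGet? tree.toList i = some '(' ∧
        PySem.List.slice tree.toList (some (i + 1)) (some (i + 3)) = target.toList))
      = pvQ tree.toList target.toList from rfl]
  set T := (List.range (tree.toList.length + 1)).map
      (fun j => (((tree.toList.take j).count '(' : Int), ((tree.toList.take j).count ')' : Int))) with hT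
  have hmap : ((PySem.List.pyRange 0 (tree.toList.length : Int) 1).filter
        (pvQ tree.toList target.toList)).map
        (fun i => (((PySem.List.pyGet? T (i + 1)).getD (0, 0)).1
                     - ((PySem.List.pyGet? T (i + 1)).getD (0, 0)).2,
                   ((PySem.List.pyGet? T (i + 1)).getD (0, 0)).1))
      = ((PySem.List.pyRange 0 (tree.toList.length : Int) 1).filter
        (pvQ tree.toList target.toList)).map (pvF tree.toList) := by
    apply List.map_congr_left
    intro i hi
    have hir : 0 ≤ i ∧ i < (tree.toList.length : Int) := by
      rw [← PySem.List.mem_pyRange_one]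
      exact List.mem_of_mem_filter hi
    have hg : PySem.List.pyGet? T (i + 1)
        = some (((tree.toList.take (i.toNat + 1)).count '(' : Int),
                ((tree.toList.take (i.toNat + 1)).count ')' : Int)) := by
      have hgl := PySem.List.pyGet?_of_nonneg (xs := T) (i := i + 1) (by omega)
      rw [hgl, hT]
      have h1 : (i + 1).toNat = i.toNat + 1 := by omega
      rw [h1, List.getElem?_map, List.getElem?_range (by omega)]
      rfl
    rw [hg]
    rfl
  rw [hmap]
  cases hML : (((PySem.List.pyRange 0 (tree.toList.length : Int) 1).filter (pvQ tree.toList target.toList)).map (pvF tree.toList)) with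
  | nil => rfl
  | cons c rest =>
    have hcd : c.1 < (tree.toList.length : Int) :=
      pvDepth_lt tree.toList target.toList hpre c (by rw [hML]; exact List.mem_cons_self)
    have hpw : (c :: rest).Pairwise (fun a b => a.2 < b.2) := by
      rw [← hML, ← hM0]
      exact pvCands_pairwise _ _ _ _ _
    rw [List.pairwise_cons] at hpw
    show (pvRunA (c :: rest) (0, (tree.toList.length : Int))).1 = _
    simp only [pvRunA, if_pos hcd]
    exact pvRunA_eq_lexmin rest c hpw.1 hpw.2

-- ===== VERDICT (by name: the statement is the Claim_ definition above) =====
theorem left_branching_tree_py_spec : Claim_equal_left_branching_tree_py := by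
  intro target tree _ hpre
  exact pvMain target tree hpre
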